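-- pv_equiv track=rewrite | github.com/AzadMehedi/Applied-Data-Science-and-Machine-Learning | Python Example/Nested_Loop_with_Dict.py | frequency_per_word
-- ===== SOURCE A (Python) =====
-- def frequency_per_word(words):
--     result = {}
--     for w in words:
--         d = {}
--         for ch in w:
--             d[ch] = d.get(ch, 0) + 1
--         result[w] = d
--     return result
-- ===== SOURCE B (Python) =====
-- def frequency_per_word(words):
--     result = {}
--     for w in words:
--         result[w] = {ch: sum(1 for c in w if c == ch) for ch in dict.fromkeys(w)}
--     return result
-- ===== Notes on version B (the rewrite author's own statement) =====
-- stated objective: alternative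
-- what changed: The inner single-pass accumulating counter dict is replaced by a dict comprehension over the word's distinct characters (dict.fromkeys) that counts each character with its own scan of the word.
import Mathlib
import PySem

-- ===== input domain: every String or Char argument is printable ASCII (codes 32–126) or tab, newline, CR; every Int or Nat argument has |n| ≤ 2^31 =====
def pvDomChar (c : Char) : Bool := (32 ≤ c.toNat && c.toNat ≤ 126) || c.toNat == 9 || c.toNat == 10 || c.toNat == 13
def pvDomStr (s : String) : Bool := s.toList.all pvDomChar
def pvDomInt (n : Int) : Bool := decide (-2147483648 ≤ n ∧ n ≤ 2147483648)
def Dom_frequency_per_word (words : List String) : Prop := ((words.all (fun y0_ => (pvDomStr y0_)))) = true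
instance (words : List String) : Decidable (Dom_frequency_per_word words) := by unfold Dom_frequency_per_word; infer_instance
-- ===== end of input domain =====

-- B replaces the inner accumulating counter dict by a comprehension over the word's
-- distinct characters that counts each character with its own scan of the word (alternative, not faster).

-- ===== PORT A =====
def frequency_per_word (words : List String) : List (String × List (String × Int)) :=
  (words.foldl
    (fun result w =>
      let d := w.toList.foldl
        (fun d ch => d.insert (String.ofList [ch]) (d.getD (String.ofList [ch]) 0 + 1))
        PySem.Dict.empty
      result.insert w d.items)
    PySem.Dict.empty).items

-- ===== PORT B =====
-- {ch: sum(1 for c in w if c == ch) for ch in dict.fromkeys(w)}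
def pvWordFreqAlt (w : String) : List (String × Int) :=
  (PySem.List.dedup w.toList).map (fun ch =>
    (String.ofList [ch], w.toList.foldl (fun acc c => if c == ch then acc + 1 else acc) (0 : Int)))

def frequency_per_word_alt (words : List String) : List (String × List (String × Int)) :=
  (words.foldl (fun result w => result.insert w (pvWordFreqAlt w)) PySem.Dict.empty).items

-- ===== PRECONDITION & SPEC =====
def Spec_frequency_per_word (words : List String) (out : List (String × List (String × Int))) : Prop := out = frequency_per_word_alt words
instance (words : List String) (out : List (String × List (String × Int))) : Decidable (Spec_frequency_per_word words out) := by unfold Spec_frequency_per_word; infer_instance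

-- ===== CLAIM (what is proved, stated in full; the proofs are below) =====
def Claim_equal_frequency_per_word : Prop := ∀ (words : List String), Dom_frequency_per_word words → Spec_frequency_per_word words (frequency_per_word words)

-- ===== LEMMAS AND PROOFS =====

theorem pvSing_injective : Function.Injective (fun ch : Char => String.ofList [ch]) := by
  intro a b h
  simpa using congrArg String.toList h

theorem pvOfList_map_add {α β : Type} [BEq α] [LawfulBEq α] [BEq β] [LawfulBEq β]
    (f : α → β) (hf : Function.Injective f) (s : PySem.Set α) (x : α) :
    PySem.Set.add (s.map f) (f x) = (PySem.Set.add s x).map f := by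
  simp only [PySem.Set.add, PySem.Set.contains, List.contains_eq_mem, List.mem_map]
  by_cases h : x ∈ s
  · rw [if_pos (by exact decide_eq_true (List.mem_map_of_mem h)), if_pos (by exact decide_eq_true h)]
  · have : ¬ ∃ a ∈ s, f a = f x := by
      rintro ⟨a, ha, hfa⟩; exact h (hf hfa ▸ ha)
    simp [h, this]


theorem pvOfList_map {α β : Type} [BEq α] [LawfulBEq α] [BEq β] [LawfulBEq β]
    (f : α → β) (hf : Function.Injective f) (l : List α) :
    PySem.Set.ofList (l.map f) = (PySem.Set.ofList l).map f := by
  unfold PySem.Set.ofList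
  suffices h : ∀ (s : PySem.Set α),
      List.foldl PySem.Set.add (s.map f) (l.map f) = (List.foldl PySem.Set.add s l).map f by
    simpa [PySem.Set.empty] using h []
  induction l with
  | nil => intro s; simp
  | cons x xs ih =>
    intro s
    simp only [List.map_cons, List.foldl_cons, pvOfList_map_add f hf]
    exact ih _

theorem pvInner_eq (w : String) :
    (w.toList.foldl
      (fun d ch => d.insert (String.ofList [ch]) (d.getD (String.ofList [ch]) 0 + 1))
      PySem.Dict.empty).items = pvWordFreqAlt w := by
  have h1 : w.toList.foldl
      (fun d ch => d.insert (String.ofList [ch]) (d.getD (String.ofList [ch]) 0 + 1))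
      (PySem.Dict.empty : PySem.Dict String Int)
      = (w.toList.map (fun ch => String.ofList [ch])).foldl
          (fun d s => d.insert s (d.getD s 0 + 1)) PySem.Dict.empty := by
    rw [List.foldl_map]
  refine (congrArg PySem.Dict.items h1).trans ?_
  rw [PySem.Dict.foldl_insert_getD_add_one_eq_counter,
    PySem.Dict.items_counter, pvOfList_map _ pvSing_injective, List.map_map]
  unfold pvWordFreqAlt
  rw [PySem.List.dedup_eq_ofList]
  refine List.map_congr_left ?_
  intro ch _
  simp only [Function.comp]
  rw [PySem.List.foldl_beq_add_one, List.count_map_of_injective _ _ pvSing_injective]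
  simp

-- ===== VERDICT (by name: the statement is the Claim_ definition above) =====
theorem frequency_per_word_spec : Claim_equal_frequency_per_word := by
  intro words _
  unfold Spec_frequency_per_word frequency_per_word frequency_per_word_alt
  congr 2
  funext result w
  simp only [pvInner_eq]
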